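-- pv_equiv track=rewrite | github.com/alanjayspector/scrap-survivor-godot | .system/validators/test_quality_validator.py | _find_incorrect_payment_patterns
-- ===== SOURCE A (Python) =====
-- def _find_incorrect_payment_patterns(content: str) -> list:
--     """Find execute_reroll() before subtract_currency() pattern."""
--     incorrect = []
--     lines = content.split('\n')
--
--     for i, line in enumerate(lines, 1):
--         if 'execute_reroll()' in line:
--             # Look ahead for subtract_currency in next 5 lines
--             for j in range(i, min(i + 5, len(lines))):
--                 if 'subtract_currency' in lines[j]:
--                     # execute_reroll came BEFORE subtract_currency = WRONG
--                     incorrect.append(i)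
--                     break
--
--     return incorrect
-- ===== SOURCE B (Python) =====
-- def _find_incorrect_payment_patterns(content: str) -> list:
--     """Single look-back pass: pending holds 1-based line numbers of recent
--     execute_reroll() lines; a subtract_currency line collects them."""
--     lines = content.split('\n')
--     pending = []   # 1-based reroll line numbers still within the 5-line window
--     result = set()
--     for s, line in enumerate(lines):  # s is 0-based
--         if 'subtract_currency' in line:
--             result.update(pending)
--         if 'execute_reroll()' in line:
--             pending.append(s + 1)
--         pending = [i for i in pending if i >= s - 3]
--     return sorted(result)
-- ===== Notes on version B (the rewrite author's own statement) =====
-- stated objective: alternative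
-- what changed: B replaces A's per-reroll look-ahead rescan of the next 5 lines by a single forward pass that keeps a bounded pending list of recent execute_reroll() line numbers, collects them into a set when a subtract_currency line is seen, and returns the sorted set.
import Mathlib
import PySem

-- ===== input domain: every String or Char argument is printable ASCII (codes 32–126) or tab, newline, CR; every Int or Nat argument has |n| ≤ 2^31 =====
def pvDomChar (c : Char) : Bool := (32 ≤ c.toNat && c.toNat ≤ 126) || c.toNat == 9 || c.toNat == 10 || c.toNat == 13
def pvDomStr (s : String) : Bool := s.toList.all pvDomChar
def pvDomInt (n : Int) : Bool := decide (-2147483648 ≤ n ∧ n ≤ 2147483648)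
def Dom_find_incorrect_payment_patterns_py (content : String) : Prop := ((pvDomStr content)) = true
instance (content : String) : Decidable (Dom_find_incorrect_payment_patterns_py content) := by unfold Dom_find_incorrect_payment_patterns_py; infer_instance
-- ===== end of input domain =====

-- B replaces A's per-reroll look-ahead rescan by a single look-back pass (pending window + result set); same return value, proved equal.

-- ===== PORT A =====
-- inner loop "for j in range(i, min(i + 5, len(lines))): if 'subtract_currency' in lines[j]: …; break"
def pvA_lookahead (lines : List String) : List Int → Bool
  | [] => false
  | j :: rest =>
    if PySem.Str.isIn "subtract_currency" (PySem.List.pyGetD lines j "") then true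
    else pvA_lookahead lines rest

def find_incorrect_payment_patterns_py (content : String) : List Int :=
  let lines := (PySem.Str.split? content "\n").getD []
  (PySem.List.enumerate lines 1).foldl
    (fun incorrect p =>
      if PySem.Str.isIn "execute_reroll()" p.2 then
        if pvA_lookahead lines (PySem.List.pyRange p.1 (min (p.1 + 5) (PySem.List.len lines)) 1)
        then incorrect ++ [p.1] else incorrect
      else incorrect) []

-- ===== PORT B =====
-- one iteration of B's loop: state is (pending reroll line numbers, result set)
def pvBstep (st : List Int × PySem.Set Int) (p : Int × String) : List Int × PySem.Set Int :=
  let result := if PySem.Str.isIn "subtract_currency" p.2 then PySem.Set.update st.2 st.1 else st.2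
  let pending := if PySem.Str.isIn "execute_reroll()" p.2 then st.1 ++ [p.1 + 1] else st.1
  (pending.filter (fun i => decide (p.1 - 3 ≤ i)), result)

def find_incorrect_payment_patterns_py_alt (content : String) : List Int :=
  let lines := (PySem.Str.split? content "\n").getD []
  let fin := (PySem.List.enumerate lines 0).foldl pvBstep ([], PySem.Set.empty)
  PySem.List.sorted fin.2 (fun x => x) false

-- ===== PRECONDITION & SPEC =====
def Spec_find_incorrect_payment_patterns_py (content : String) (out : List Int) : Prop := out = find_incorrect_payment_patterns_py_alt content
instance (content : String) (out : List Int) : Decidable (Spec_find_incorrect_payment_patterns_py content out) := by unfold Spec_find_incorrect_payment_patterns_py; infer_instance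

-- ===== CLAIM (what is proved, stated in full; the proofs are below) =====
def Claim_equal_find_incorrect_payment_patterns_py : Prop := ∀ (content : String), Dom_find_incorrect_payment_patterns_py content → Spec_find_incorrect_payment_patterns_py content (find_incorrect_payment_patterns_py content)

-- ===== LEMMAS AND PROOFS =====

def pvRer (lines : List String) (k : Nat) : Bool :=
  PySem.Str.isIn "execute_reroll()" (lines.getD k "")
def pvSub (lines : List String) (k : Nat) : Bool :=
  PySem.Str.isIn "subtract_currency" (lines.getD k "")

-- 1-based line number k+1 is reported, looking only at subtract lines with 0-based index < t
def pvHitB (lines : List String) (t k : Nat) : Bool :=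
  pvRer lines k && (List.range 5).any (fun m => decide (k + 1 + m < t) && pvSub lines (k + 1 + m))

def pvCanon (lines : List String) (t : Nat) : List Int :=
  (List.range t).filterMap (fun k => if pvHitB lines t k then some ((k : Int) + 1) else none)

-- pending window after the first t lines: rerolls at 0-based k with k < t still inside the 5-line window
def pvPending (lines : List String) (t : Nat) : List Int :=
  (List.range t).filterMap (fun k => if pvRer lines k && decide (t ≤ k + 5) then some ((k : Int) + 1) else none)

lemma pv_hit_lt {lines : List String} {t k : Nat} (h : pvHitB lines t k = true) : k < t := by
  simp only [pvHitB, Bool.and_eq_true, List.any_eq_true, List.mem_range, decide_eq_true_eq] at h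
  obtain ⟨-, m, -, h1, -⟩ := h; omega

lemma pv_mem_canon (lines : List String) (t : Nat) (x : Int) :
    x ∈ pvCanon lines t ↔ ∃ k, pvHitB lines t k = true ∧ x = (k : Int) + 1 := by
  simp only [pvCanon, List.mem_filterMap, List.mem_range]
  constructor
  · rintro ⟨k, hk, hf⟩
    split at hf
    · exact ⟨k, by assumption, by injection hf with h'; omega⟩
    · simp at hf
  · rintro ⟨k, hk, rfl⟩
    exact ⟨k, pv_hit_lt hk, by simp [hk]⟩

lemma pv_mem_pending (lines : List String) (t : Nat) (x : Int) :
    x ∈ pvPending lines t ↔ ∃ k, k < t ∧ pvRer lines k = true ∧ t ≤ k + 5 ∧ x = (k : Int) + 1 := by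
  simp only [pvPending, List.mem_filterMap, List.mem_range]
  constructor
  · rintro ⟨k, hk, hf⟩
    split at hf
    · rename_i h; simp only [Bool.and_eq_true, decide_eq_true_eq] at h
      exact ⟨k, hk, h.1, h.2, by injection hf with h'; omega⟩
    · simp at hf
  · rintro ⟨k, hk, h1, h2, rfl⟩
    exact ⟨k, hk, by simp [h1, h2]⟩

lemma pv_canon_pairwise (lines : List String) (t : Nat) :
    (pvCanon lines t).Pairwise (· < ·) := by
  apply List.Pairwise.filterMap (f := fun k => if pvHitB lines t k then some ((k : Int) + 1) else none) (R := fun a b : Nat => a < b)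
  · intro a b hab x hfx y hfy
    split at hfx <;> split at hfy <;> simp_all
    omega
  · exact List.pairwise_lt_range

lemma pv_lookahead_any (lines : List String) (js : List Int) :
    pvA_lookahead lines js
      = js.any (fun j => PySem.Str.isIn "subtract_currency" (PySem.List.pyGetD lines j "")) := by
  induction js with
  | nil => rfl
  | cons j rest ih =>
    rw [List.any_cons, ← ih, pvA_lookahead]
    by_cases h : PySem.Str.isIn "subtract_currency" (PySem.List.pyGetD lines j "") = true <;> simp

lemma pv_look_eq_hit (lines : List String) (k : Nat) (hk : k < lines.length) :
    (PySem.Str.isIn "execute_reroll()" lines[k]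
      && pvA_lookahead lines
          (PySem.List.pyRange (1 + (k : Int)) (min (1 + (k : Int) + 5) (PySem.List.len lines)) 1))
      = pvHitB lines lines.length k := by
  rw [pv_lookahead_any, Bool.eq_iff_iff]
  simp only [pvHitB, pvRer, pvSub, Bool.and_eq_true, List.any_eq_true, List.mem_range,
    decide_eq_true_eq, PySem.List.mem_pyRange_one, PySem.List.len_eq,
    List.getD_eq_getElem?_getD]
  constructor
  · rintro ⟨hr, j, ⟨hj1, hj2⟩, hs⟩
    refine ⟨by simpa [List.getElem?_eq_getElem hk] using hr, (j - (1 + (k:Int))).toNat, by omega, ?_, ?_⟩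
    · omega
    · have hjc : j = ((k + 1 + (j - (1 + (k:Int))).toNat : Nat) : Int) := by push_cast; omega
      rw [hjc, PySem.List.pyGetD_natCast] at hs
      simpa [List.getD_eq_getElem?_getD] using hs
  · rintro ⟨hr, m, hm, hlt, hs⟩
    refine ⟨by simpa [List.getElem?_eq_getElem hk] using hr, ((k + 1 + m : Nat) : Int), ⟨by push_cast; omega, by push_cast; omega⟩, ?_⟩
    rw [PySem.List.pyGetD_natCast]
    simpa [List.getD_eq_getElem?_getD] using hs

lemma pvA_eq_canon (lines : List String) :
    (PySem.List.enumerate lines 1).foldl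
      (fun incorrect p =>
        if PySem.Str.isIn "execute_reroll()" p.2 then
          if pvA_lookahead lines (PySem.List.pyRange p.1 (min (p.1 + 5) (PySem.List.len lines)) 1)
          then incorrect ++ [p.1] else incorrect
        else incorrect) [] = pvCanon lines lines.length := by
  rw [PySem.List.foldl_congr_mem (g := fun incorrect p =>
        if (PySem.Str.isIn "execute_reroll()" p.2
            && pvA_lookahead lines (PySem.List.pyRange p.1 (min (p.1 + 5) (PySem.List.len lines)) 1))
        then incorrect ++ [p.1] else incorrect)]
  · rw [PySem.List.foldl_append_if]
    set q := fun p : Int × String =>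
      (PySem.Str.isIn "execute_reroll()" p.2
        && pvA_lookahead lines (PySem.List.pyRange p.1 (min (p.1 + 5) (PySem.List.len lines)) 1)) with hq
    have hpw : (((PySem.List.enumerate lines 1).filter q).map (·.1)).Pairwise (· < ·) :=
      ((PySem.List.pairwise_lt_enumerate lines 1).filter q).map _ (fun a b h => h)
    have hmem : ∀ x, x ∈ ((PySem.List.enumerate lines 1).filter q).map (·.1)
        ↔ x ∈ pvCanon lines lines.length := by
      intro x
      rw [pv_mem_canon]
      simp only [List.mem_map, List.mem_filter, PySem.List.mem_enumerate_iff]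
      constructor
      · rintro ⟨p, ⟨⟨k, hk, rfl⟩, hqp⟩, rfl⟩
        refine ⟨k, ?_, by omega⟩
        rw [← pv_look_eq_hit lines k hk]
        simpa [hq] using hqp
      · rintro ⟨k, hhit, rfl⟩
        have hk := pv_hit_lt hhit
        refine ⟨(1 + (k : Int), lines[k]), ⟨⟨k, hk, rfl⟩, ?_⟩, by omega⟩
        rw [hq]
        show (PySem.Str.isIn "execute_reroll()" lines[k]
          && pvA_lookahead lines
              (PySem.List.pyRange (1 + (k : Int)) (min (1 + (k : Int) + 5) (PySem.List.len lines)) 1)) = true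
        rw [pv_look_eq_hit lines k hk]
        exact hhit
    have hnd : (((PySem.List.enumerate lines 1).filter q).map (·.1)).Nodup :=
      hpw.imp (fun h => ne_of_lt h)
    have hndc : (pvCanon lines lines.length).Nodup :=
      (pv_canon_pairwise lines lines.length).imp (fun h => ne_of_lt h)
    have hperm : (pvCanon lines lines.length).Perm (((PySem.List.enumerate lines 1).filter q).map (·.1)) :=
      (List.perm_ext_iff_of_nodup hndc hnd).mpr (fun a => ((hmem a).symm))
    have := PySem.List.sorted_eq_of_perm_of_pairwise_lt
      (((PySem.List.enumerate lines 1).filter q).map (·.1)) (pvCanon lines lines.length)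
      (fun x => x) hperm (pv_canon_pairwise lines lines.length)
    have h2 := PySem.List.sorted_eq_of_perm_of_pairwise_lt
      (((PySem.List.enumerate lines 1).filter q).map (·.1))
      (((PySem.List.enumerate lines 1).filter q).map (·.1))
      (fun x => x) (List.Perm.refl _) hpw
    rw [← h2, this, List.nil_append]
  · intro acc p _
    cases h1 : PySem.Str.isIn "execute_reroll()" p.2 <;>
      cases h2 : pvA_lookahead lines (PySem.List.pyRange p.1 (min (p.1 + 5) (PySem.List.len lines)) 1) <;>
      simp

lemma pv_getD_eq (lines : List String) (t : Nat) (ht : t < lines.length) :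
    lines.getD t "" = lines[t] := List.getD_eq_getElem lines "" ht

lemma pv_pending_step (lines : List String) (t : Nat) (ht : t < lines.length) :
    ((if PySem.Str.isIn "execute_reroll()" lines[t] = true
        then pvPending lines t ++ [(t : Int) + 1] else pvPending lines t).filter
      (fun i => decide ((t : Int) - 3 ≤ i))) = pvPending lines (t + 1) := by
  have hcommon : (pvPending lines t).filter (fun i => decide ((t : Int) - 3 ≤ i))
      = (List.range t).filterMap
          (fun k => if pvRer lines k && decide (t + 1 ≤ k + 5) then some ((k : Int) + 1) else none) := by
    rw [pvPending, List.filter_filterMap]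
    apply List.filterMap_congr
    intro k _
    by_cases hr : pvRer lines k = true
    · by_cases h5 : t ≤ k + 5
      · by_cases h4 : t ≤ k + 4
        · have h2 : (t + 1 ≤ k + 5) = True := by simp; omega
          simp [hr, h5, h2]
          omega
        · have h2 : (t + 1 ≤ k + 5) = False := by simp; omega
          simp [hr, h5, h2]
          omega
      · have h2 : (t + 1 ≤ k + 5) = False := by simp; omega
        simp [hr, h5, h2]
    · simp [hr]
  have hlast : pvPending lines (t + 1)
      = (List.range t).filterMap
          (fun k => if pvRer lines k && decide (t + 1 ≤ k + 5) then some ((k : Int) + 1) else none)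
        ++ (if pvRer lines t then [(t : Int) + 1] else []) := by
    rw [pvPending, List.range_succ, List.filterMap_append]
    congr 1
    by_cases hr : pvRer lines t = true <;> simp [hr]
  have hR : PySem.Str.isIn "execute_reroll()" lines[t] = pvRer lines t := by
    rw [pvRer, pv_getD_eq lines t ht]
  rw [hR, hlast, ← hcommon]
  by_cases hr : pvRer lines t = true
  · simp only [hr, if_true, List.filter_append]
    congr 1
    simp
    omega
  · simp only [hr]
    simp

lemma pv_hit_succ (lines : List String) (t k : Nat) :
    pvHitB lines (t + 1) k = true ↔
      pvHitB lines t k = true ∨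
        (pvSub lines t = true ∧ k < t ∧ t ≤ k + 5 ∧ pvRer lines k = true) := by
  simp only [pvHitB, Bool.and_eq_true, List.any_eq_true, List.mem_range, decide_eq_true_eq]
  constructor
  · rintro ⟨hr, m, hm, hlt, hs⟩
    by_cases h : k + 1 + m < t
    · exact Or.inl ⟨hr, m, hm, h, hs⟩
    · have : k + 1 + m = t := by omega
      exact Or.inr ⟨this ▸ hs, by omega, by omega, hr⟩
  · rintro (⟨hr, m, hm, hlt, hs⟩ | ⟨hs, hk, h4, hr⟩)
    · exact ⟨hr, m, hm, by omega, hs⟩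
    · exact ⟨hr, t - (k + 1), by omega, by omega, by rw [show k + 1 + (t - (k + 1)) = t by omega]; exact hs⟩

lemma pv_canon_succ_mem (lines : List String) (t : Nat) (x : Int) :
    x ∈ pvCanon lines (t + 1) ↔
      x ∈ pvCanon lines t ∨ (pvSub lines t = true ∧ x ∈ pvPending lines t) := by
  rw [pv_mem_canon, pv_mem_canon, pv_mem_pending]
  constructor
  · rintro ⟨k, hhit, rfl⟩
    rcases (pv_hit_succ lines t k).mp hhit with h | ⟨hs, hk, h4, hr⟩
    · exact Or.inl ⟨k, h, rfl⟩
    · exact Or.inr ⟨hs, k, hk, hr, by omega, rfl⟩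
  · rintro (⟨k, h, rfl⟩ | ⟨hs, k, hk, hr, h5, rfl⟩)
    · exact ⟨k, (pv_hit_succ lines t k).mpr (Or.inl h), rfl⟩
    · exact ⟨k, (pv_hit_succ lines t k).mpr (Or.inr ⟨hs, hk, by omega, hr⟩), rfl⟩

lemma pv_loop (lines : List String) (c : Nat) : ∀ (t : Nat), t + c = lines.length →
    ∀ (result : PySem.Set Int), result.Nodup →
    (∀ x, x ∈ result ↔ x ∈ pvCanon lines t) →
    ((PySem.List.enumerate (lines.drop t) (t : Int)).foldl pvBstep (pvPending lines t, result)).2.Nodup ∧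
    ∀ x, x ∈ ((PySem.List.enumerate (lines.drop t) (t : Int)).foldl pvBstep (pvPending lines t, result)).2 ↔
      x ∈ pvCanon lines lines.length := by
  induction c with
  | zero =>
    intro t ht result hnd hm
    have : lines.drop t = [] := List.drop_eq_nil_of_le (by omega)
    rw [this, PySem.List.enumerate_nil]
    simp only [List.foldl_nil]
    exact ⟨hnd, by rw [show t = lines.length by omega] at hm; exact hm⟩
  | succ c ih =>
    intro t ht result hnd hm
    have htlt : t < lines.length := by omega
    have hdrop : lines.drop t = lines[t] :: lines.drop (t + 1) :=
      (List.getElem_cons_drop htlt).symm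
    rw [hdrop, PySem.List.enumerate_cons]
    simp only [List.foldl_cons]
    have hstep : pvBstep (pvPending lines t, result) ((t : Int), lines[t])
        = (pvPending lines (t + 1),
           if PySem.Str.isIn "subtract_currency" lines[t] then PySem.Set.update result (pvPending lines t) else result) := by
      rw [pvBstep]
      congr 1
      · by_cases hR : PySem.Str.isIn "execute_reroll()" lines[t] = true
        · rw [if_pos hR, ← pv_pending_step lines t htlt, if_pos hR]
        · rw [if_neg hR, ← pv_pending_step lines t htlt, if_neg hR]
    rw [hstep]
    have hcast : (t : Int) + 1 = ((t + 1 : Nat) : Int) := by push_cast; ring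
    rw [hcast]
    apply ih (t + 1) (by omega)
    · by_cases hS : PySem.Str.isIn "subtract_currency" lines[t] = true
      · rw [if_pos hS]; exact PySem.Set.nodup_update result (pvPending lines t) hnd
      · rw [if_neg hS]; exact hnd
    · intro x
      rw [pv_canon_succ_mem]
      have hSub : PySem.Str.isIn "subtract_currency" lines[t] = pvSub lines t := by
        rw [pvSub, pv_getD_eq lines t htlt]
      by_cases hS : pvSub lines t = true
      · rw [hSub, if_pos hS, PySem.Set.mem_update]
        rw [hm]
        tauto
      · rw [hSub, if_neg hS, hm]
        have : ¬ (pvSub lines t = true ∧ x ∈ pvPending lines t) := fun h => hS h.1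
        tauto

lemma pvB_eq_canon (lines : List String) :
    PySem.List.sorted ((PySem.List.enumerate lines 0).foldl pvBstep ([], PySem.Set.empty)).2 (fun x => x) false
      = pvCanon lines lines.length := by
  have h0 : ((PySem.List.enumerate lines 0).foldl pvBstep ([], PySem.Set.empty))
      = ((PySem.List.enumerate (lines.drop 0) ((0 : Nat) : Int)).foldl pvBstep (pvPending lines 0, ([] : PySem.Set Int))) := by
    simp [pvPending, PySem.Set.empty]
  obtain ⟨hnd, hmem⟩ := pv_loop lines lines.length 0 (by omega) ([] : PySem.Set Int)
    List.nodup_nil (by intro x; simp [pvCanon])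
  rw [h0]
  have hndc : (pvCanon lines lines.length).Nodup :=
    (pv_canon_pairwise lines lines.length).imp (fun h => ne_of_lt h)
  exact PySem.List.sorted_eq_of_perm_of_pairwise_lt _ _ (fun x => x)
    ((List.perm_ext_iff_of_nodup hndc hnd).mpr (fun a => (hmem a).symm))
    (pv_canon_pairwise lines lines.length)

lemma pv_main (lines : List String) :
    (PySem.List.enumerate lines 1).foldl
      (fun incorrect p =>
        if PySem.Str.isIn "execute_reroll()" p.2 then
          if pvA_lookahead lines (PySem.List.pyRange p.1 (min (p.1 + 5) (PySem.List.len lines)) 1)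
          then incorrect ++ [p.1] else incorrect
        else incorrect) []
    = PySem.List.sorted ((PySem.List.enumerate lines 0).foldl pvBstep ([], PySem.Set.empty)).2 (fun x => x) false := by
  rw [pvA_eq_canon, pvB_eq_canon]

-- ===== VERDICT (by name: the statement is the Claim_ definition above) =====
theorem find_incorrect_payment_patterns_py_spec : Claim_equal_find_incorrect_payment_patterns_py := by
  intro content _
  unfold Spec_find_incorrect_payment_patterns_py find_incorrect_payment_patterns_py find_incorrect_payment_patterns_py_alt
  exact pv_main ((PySem.Str.split? content "\n").getD [])
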